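-- pv_equiv track=rewrite | github.com/Brian679/stayRez | backend/web/views.py | _normalize_service_property_type
-- ===== SOURCE A (Python) =====
-- def _normalize_service_property_type(value: str) -> str:
--     """Normalize Service.property_type into a stable internal key."""
--     if not value:
--         return ""
--     v = str(value).strip().lower()
--     for ch in ("-", " ", "/"):
--         v = v.replace(ch, "_")
--     while "__" in v:
--         v = v.replace("__", "_")
--     return v
-- ===== SOURCE B (Python) =====
-- def _normalize_service_property_type(value: str) -> str:
--     """Normalize Service.property_type into a stable internal key."""
--     if not value:
--         return ""
--     v = str(value).strip().lower()
--     out = []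
--     prev_sep = False
--     for ch in v:
--         if ch in "-_ /":
--             if not prev_sep:
--                 out.append("_")
--             prev_sep = True
--         else:
--             out.append(ch)
--             prev_sep = False
--     return "".join(out)
-- ===== Notes on version B (the rewrite author's own statement) =====
-- stated objective: alternative
-- what changed: Replaces A's three full-string replace passes plus the repeated '__'-collapsing while loop with one explicit left-to-right pass that emits a single '_' per maximal run of separator-or-underscore characters.
import Mathlib
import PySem

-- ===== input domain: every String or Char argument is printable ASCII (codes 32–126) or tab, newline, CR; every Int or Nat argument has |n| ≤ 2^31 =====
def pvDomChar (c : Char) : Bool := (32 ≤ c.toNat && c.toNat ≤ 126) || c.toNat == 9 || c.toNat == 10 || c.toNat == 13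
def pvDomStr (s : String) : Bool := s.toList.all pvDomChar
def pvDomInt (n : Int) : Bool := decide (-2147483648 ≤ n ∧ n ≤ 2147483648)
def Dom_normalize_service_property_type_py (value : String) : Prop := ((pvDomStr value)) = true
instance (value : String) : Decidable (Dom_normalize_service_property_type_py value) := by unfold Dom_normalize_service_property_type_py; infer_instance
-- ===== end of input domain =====

-- B replaces A's three replace passes plus the '__'-collapsing while loop by one explicit pass
-- that emits a single '_' per maximal run of separator-or-underscore characters (objective: alternative).

-- ===== PORT A =====
-- while "__" in v: v = v.replace("__", "_")   (fuel = v.length makes the loop total; each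
-- iteration with "__" present strictly shrinks v, so the fuel is never exhausted)
def pyAwhile : Nat → List Char → List Char
  | 0, v => v
  | fuel + 1, v =>
    if PySem.Chars.isIn ['_', '_'] v then
      pyAwhile fuel (PySem.Chars.replace v ['_', '_'] ['_'])
    else v

def normalize_service_property_type_py (value : String) : String :=
  if value == "" then ""
  else
    let v0 := PySem.Chars.lower (PySem.Chars.strip value.toList)
    let v1 := PySem.Chars.replace v0 ['-'] ['_']
    let v2 := PySem.Chars.replace v1 [' '] ['_']
    let v3 := PySem.Chars.replace v2 ['/'] ['_']
    String.ofList (pyAwhile v3.length v3)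

-- ===== PORT B =====
-- ch in "-_ /"
def bSep (c : Char) : Bool := c == '-' || c == '_' || c == ' ' || c == '/'

-- the single pass with the prev_sep flag
def bPass : Bool → List Char → List Char
  | _, [] => []
  | prev, c :: t =>
    if bSep c then
      (if prev then bPass true t else '_' :: bPass true t)
    else c :: bPass false t

def normalize_service_property_type_py_alt (value : String) : String :=
  if value == "" then ""
  else String.ofList (bPass false (PySem.Chars.lower (PySem.Chars.strip value.toList)))

-- ===== PRECONDITION & SPEC =====
def Spec_normalize_service_property_type_py (value : String) (out : String) : Prop := out = normalize_service_property_type_py_alt value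
instance (value : String) (out : String) : Decidable (Spec_normalize_service_property_type_py value out) := by unfold Spec_normalize_service_property_type_py; infer_instance

-- ===== CLAIM (what is proved, stated in full; the proofs are below) =====
def Claim_equal_normalize_service_property_type_py : Prop := ∀ (value : String), Dom_normalize_service_property_type_py value → Spec_normalize_service_property_type_py value (normalize_service_property_type_py value)

-- ===== LEMMAS AND PROOFS =====

-- the combined effect of the three single-character replaces
def pvF (c : Char) : Char :=
  if c == '-' then '_' else if c == ' ' then '_' else if c == '/' then '_' else c

-- v.replace("__", "_") as one structural pass
def pvStep : List Char → List Char
  | [] => []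
  | [c] => [c]
  | a :: b :: t => if a == '_' && b == '_' then '_' :: pvStep t else a :: pvStep (b :: t)

-- "__" in v as a structural predicate
def pvDD : List Char → Bool
  | [] => false
  | [_] => false
  | a :: b :: t => (a == '_' && b == '_') || pvDD (b :: t)

-- collapse runs of '_' to one '_' (bPass specialised to the image of pvF)
def pvSqu : Bool → List Char → List Char
  | _, [] => []
  | p, c :: t => if c == '_' then (if p then pvSqu true t else '_' :: pvSqu true t) else c :: pvSqu false t

theorem pvGoRepl1 (a b : Char) : ∀ (fuel : Nat) (l acc : List Char), l.length ≤ fuel →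
    PySem.Chars.replace.go [a] [b] fuel l acc = acc.reverse ++ l.map (fun c => if c == a then b else c) := by
  intro fuel
  induction fuel with
  | zero =>
    intro l acc h
    have : l = [] := List.eq_nil_of_length_eq_zero (Nat.le_zero.mp h)
    subst this; simp [PySem.Chars.replace.go]
  | succ n ih =>
    intro l acc h
    cases l with
    | nil => simp [PySem.Chars.replace.go]
    | cons c t =>
      have ht : t.length ≤ n := by simp at h; omega
      by_cases hac : a = c
      · subst hac
        simp only [PySem.Chars.replace.go, List.isPrefixOf, BEq.rfl, Bool.true_and,
          List.isPrefixOf_nil_left, if_true, List.length_cons, List.length_nil,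
          List.drop_succ_cons, List.drop_zero, List.reverse_cons, List.reverse_nil,
          List.nil_append]
        rw [ih t ([b] ++ acc) ht]
        simp
      · have hbeq : (a == c) = false := by simp [hac]
        simp only [PySem.Chars.replace.go, List.isPrefixOf, hbeq, Bool.false_and,
          Bool.false_eq_true, if_false]
        rw [ih t (c :: acc) ht]
        simp [Ne.symm hac]

theorem pvReplaceSingle (a b : Char) (s : List Char) :
    PySem.Chars.replace s [a] [b] = s.map (fun c => if c == a then b else c) := by
  have := pvGoRepl1 a b s.length s [] (le_refl _)
  simpa [PySem.Chars.replace] using this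

theorem pvGoRepl2 : ∀ (fuel : Nat) (l acc : List Char), l.length ≤ fuel →
    PySem.Chars.replace.go ['_', '_'] ['_'] fuel l acc = acc.reverse ++ pvStep l := by
  intro fuel
  induction fuel with
  | zero =>
    intro l acc h
    have : l = [] := List.eq_nil_of_length_eq_zero (Nat.le_zero.mp h)
    subst this; simp [PySem.Chars.replace.go, pvStep]
  | succ n ih =>
    intro l acc h
    cases l with
    | nil => simp [PySem.Chars.replace.go, pvStep]
    | cons c t =>
      cases t with
      | nil =>
        have hpre : (['_', '_'].isPrefixOf [c]) = false := by
          simp [List.isPrefixOf]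
        simp only [PySem.Chars.replace.go, hpre, Bool.false_eq_true, if_false]
        rw [ih [] (c :: acc) (by simp)]
        simp [pvStep]
      | cons d t' =>
        by_cases hcd : c = '_' ∧ d = '_'
        · obtain ⟨hc, hd⟩ := hcd; subst hc; subst hd
          have hpre : (['_', '_'].isPrefixOf ('_' :: '_' :: t')) = true := by
            simp [List.isPrefixOf]
          simp only [PySem.Chars.replace.go, hpre, if_true, List.length_cons,
            List.length_nil, List.drop_succ_cons, List.drop_zero, List.reverse_cons,
            List.reverse_nil, List.nil_append]
          rw [ih t' (['_'] ++ acc) (by simp at h; omega)]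
          simp [pvStep]
        · have hpre : (['_', '_'].isPrefixOf (c :: d :: t')) = false := by
            simp [List.isPrefixOf]
            intro hc hd; exact hcd ⟨hc.symm, hd.symm⟩
          simp only [PySem.Chars.replace.go, hpre, Bool.false_eq_true, if_false]
          rw [ih (d :: t') (c :: acc) (by simp at h ⊢; omega)]
          have hb : (c == '_' && d == '_') = false := by
            rw [Bool.and_eq_false_iff]
            by_cases hc : c = '_'
            · right
              simp only [beq_eq_false_iff_ne, ne_eq]
              intro hd; exact hcd ⟨hc, hd⟩
            · left; simpa using hc
          simp [pvStep, hb]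

theorem pvReplaceDD (u : List Char) :
    PySem.Chars.replace u ['_', '_'] ['_'] = pvStep u := by
  have := pvGoRepl2 u.length u [] (le_refl _)
  simpa [PySem.Chars.replace] using this

theorem pvDD_iff (u : List Char) : pvDD u = true ↔ ['_', '_'] <:+: u := by
  fun_induction pvDD u with
  | case1 => simp
  | case2 c =>
    constructor
    · intro hdd
      simp [pvDD] at hdd
    · intro hinf
      have := hinf.length_le
      simp at this
  | case3 a b t ih =>
    simp only [Bool.or_eq_true, Bool.and_eq_true, beq_iff_eq, ih,
      List.infix_cons_iff (l₂ := b :: t), List.cons_prefix_cons]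
    constructor
    · rintro (⟨ha, hb⟩ | h)
      · subst ha; subst hb
        exact Or.inl ⟨rfl, by simp [List.cons_prefix_cons]⟩
      · exact Or.inr h
    · rintro (⟨ha, hb⟩ | h)
      · simp [List.cons_prefix_cons] at hb
        exact Or.inl ⟨ha.symm, hb.symm⟩
      · exact Or.inr h

theorem pvIsIn_eq_dd (u : List Char) : PySem.Chars.isIn ['_', '_'] u = pvDD u := by
  by_cases h : pvDD u = true
  · rw [h]; exact (PySem.Chars.isIn_iff_infix _ _).mpr ((pvDD_iff u).mp h)
  · have h' := Bool.eq_false_iff.mpr (fun hh => h hh) -- pvDD u = false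
    rw [Bool.not_eq_true] at h
    rw [h]
    exact (PySem.Chars.isIn_eq_false_iff _ _).mpr (fun hi => by simp [← pvDD_iff u, h] at hi)

theorem pvStep_len_le (u : List Char) : (pvStep u).length ≤ u.length := by
  fun_induction pvStep u with
  | case1 => simp [pvStep]
  | case2 c => simp [pvStep]
  | case3 a b t h ih =>
    simp only [List.length_cons]
    omega
  | case4 a b t h ih =>
    simp only [List.length_cons] at ih ⊢
    omega

theorem pvStep_len_lt (u : List Char) (h : pvDD u = true) : (pvStep u).length < u.length := by
  fun_induction pvStep u with
  | case1 => simp [pvDD] at h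
  | case2 c => simp [pvDD] at h
  | case3 a b t hc ih =>
    have := pvStep_len_le t
    simp only [List.length_cons]
    omega
  | case4 a b t hc ih =>
    simp [pvDD, hc] at h
    have := ih h
    simp only [List.length_cons] at this ⊢
    omega

theorem pvSqu_cons (p : Bool) (c : Char) (t : List Char) :
    pvSqu p (c :: t) = if c == '_' then (if p then pvSqu true t else '_' :: pvSqu true t) else c :: pvSqu false t := by
  cases p <;> rfl

theorem pvSqu_true_not_us (c : Char) (t : List Char) (h : (c == '_') = false) :
    pvSqu true (c :: t) = pvSqu false (c :: t) := by
  simp [pvSqu, h]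

theorem pvSqu_step (u : List Char) : ∀ p, pvSqu p (pvStep u) = pvSqu p u := by
  fun_induction pvStep u with
  | case1 => intro p; rfl
  | case2 c => intro p; rfl
  | case3 a b t h ih =>
    intro p
    rw [Bool.and_eq_true, beq_iff_eq, beq_iff_eq] at h
    obtain ⟨ha, hb⟩ := h
    subst ha; subst hb
    cases p <;> simp [pvSqu_cons, ih]
  | case4 a b t h ih =>
    intro p
    by_cases ha : a = '_'
    · subst ha
      have hb : (b == '_') = false := by
        by_cases hbe : b = '_'
        · exact absurd (by simp [hbe]) h
        · simpa using hbe
      cases p <;> simp [pvSqu_cons, hb, ih]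
    · have ha' : (a == '_') = false := by simpa using ha
      simp [pvSqu_cons, ha', ih]

theorem pvSqu_nodd (u : List Char) (h : pvDD u = false) : pvSqu false u = u := by
  fun_induction pvDD u with
  | case1 => rfl
  | case2 c =>
    by_cases hc : c = '_' <;> simp [pvSqu, hc]
  | case3 a b t ih =>
    simp only [pvDD, Bool.or_eq_false_iff, Bool.and_eq_false_iff] at h
    obtain ⟨h1, h2⟩ := h
    by_cases ha : a = '_'
    · subst ha
      have hb : (b == '_') = false := by
        rcases h1 with h1 | h1
        · simp at h1
        · exact h1
      rw [pvSqu_cons]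
      simp only [beq_self_eq_true, if_true, Bool.false_eq_true, if_false]
      rw [pvSqu_true_not_us b t hb, ih h2]
    · have ha' : (a == '_') = false := by simpa using ha
      rw [pvSqu_cons]
      simp only [ha', Bool.false_eq_true, if_false]
      rw [ih h2]

theorem pvLoop_eq : ∀ (fuel : Nat) (u : List Char), u.length ≤ fuel →
    pyAwhile fuel u = pvSqu false u := by
  intro fuel
  induction fuel with
  | zero =>
    intro u h
    have : u = [] := List.eq_nil_of_length_eq_zero (Nat.le_zero.mp h)
    subst this; rfl
  | succ n ih =>
    intro u h
    by_cases hin : PySem.Chars.isIn ['_', '_'] u = true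
    · have hdd : pvDD u = true := by rw [← pvIsIn_eq_dd]; exact hin
      simp only [pyAwhile, hin, if_true, pvReplaceDD]
      rw [ih _ (by have := pvStep_len_lt u hdd; omega)]
      exact pvSqu_step u false
    · have hdd : pvDD u = false := by rw [← pvIsIn_eq_dd]; simpa using hin
      simp only [pyAwhile, hin, Bool.false_eq_true, if_false]
      · exact (pvSqu_nodd u hdd).symm

theorem pvMapChain (sv : List Char) :
    PySem.Chars.replace (PySem.Chars.replace (PySem.Chars.replace sv ['-'] ['_']) [' '] ['_']) ['/'] ['_']
      = sv.map pvF := by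
  rw [pvReplaceSingle, pvReplaceSingle, pvReplaceSingle, List.map_map, List.map_map]
  apply List.map_congr_left
  intro c _
  simp only [Function.comp, pvF]
  by_cases h1 : c = '-' <;> by_cases h2 : c = ' ' <;> by_cases h3 : c = '/' <;>
    simp [h1, h2, h3]

theorem pvSep_iff_f (c : Char) : bSep c = true ↔ pvF c = '_' := by
  unfold bSep pvF
  by_cases h1 : c = '-' <;> by_cases h2 : c = ' ' <;> by_cases h3 : c = '/' <;>
    simp [h1, h2, h3]

theorem pvBridge (sv : List Char) : ∀ p, bPass p sv = pvSqu p (sv.map pvF) := by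
  induction sv with
  | nil => intro p; rfl
  | cons c t ih =>
    intro p
    by_cases hb : bSep c = true
    · have hf : pvF c = '_' := (pvSep_iff_f c).mp hb
      cases p with
      | false => simp [bPass, pvSqu, hb, hf, ih]
      | true => simp [bPass, pvSqu, hb, hf, ih]
    · have h1 : ¬ c = '-' := fun hh => hb (by simp [bSep, hh])
      have h2 : ¬ c = '_' := fun hh => hb (by simp [bSep, hh])
      have h3 : ¬ c = ' ' := fun hh => hb (by simp [bSep, hh])
      have h4 : ¬ c = '/' := fun hh => hb (by simp [bSep, hh])
      have hf : pvF c = c := by simp [pvF, h1, h3, h4]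
      have hcu : (c == '_') = false := by simpa using h2
      simp [bPass, pvSqu_cons, hb, hf, hcu, ih]

-- ===== VERDICT (by name: the statement is the Claim_ definition above) =====
theorem normalize_service_property_type_py_spec : Claim_equal_normalize_service_property_type_py := by
  unfold Claim_equal_normalize_service_property_type_py
  intro value _
  unfold Spec_normalize_service_property_type_py
  unfold normalize_service_property_type_py normalize_service_property_type_py_alt
  by_cases h : value == ""
  · simp [h]
  · simp only [h, Bool.false_eq_true, if_false]
    rw [pvMapChain]
    rw [pvLoop_eq _ _ (le_refl _)]
    rw [pvBridge]
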